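-- pv_equiv track=rewrite | github.com/cirosantilli/project-euler-solvers | solvers/230.py | solve
-- ===== SOURCE A (Python) =====
-- def build_fibonacci(block_size: int) -> list[int]:
--     fibonacci = [0, block_size]
--     while fibonacci[-1] < (1 << 63):
--         fibonacci.append(fibonacci[-2] + fibonacci[-1])
--     return fibonacci
--
-- def digit_at(A: str, B: str, index: int, fibonacci: list[int]) -> str:
--     current = 1
--     while index >= fibonacci[current]:
--         current += 1
--
--     while True:
--         if current == 1:
--             return A[index]
--         if current == 2:
--             return B[index]
--
--         mid = fibonacci[current - 2]
--         if index < mid: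
--             current -= 2
--         else:
--             index -= mid
--             current -= 1
--
-- def solve(A: str, B: str) -> str:
--     block_size = len(A)
--     fibonacci = build_fibonacci(block_size)
--
--     output = []
--     for n in range(17, -1, -1):
--         index = 127 + 19 * n
--         for _ in range(1, n + 1):
--             index *= 7
--         index -= 1
--         output.append(digit_at(A, B, index, fibonacci))
--
--     return "".join(output)
-- ===== SOURCE B (Python) =====
-- def solve(A: str, B: str) -> str:
--     # Block decomposition: the infinite word is blocks of size len(A), whose block
--     # sequence follows the pure Fibonacci numbers; reduce each query to
--     # (block index, offset) with divmod and descend on pure Fibonacci numbers.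
--     bs = len(A)
--     out = []
--     for n in range(17, -1, -1):
--         index = (127 + 19 * n) * 7 ** n - 1
--         q, r = divmod(index, bs)
--         # find smallest c >= 1 with q < fib(c)  (fib(1) = fib(2) = 1)
--         x, y, c = 0, 1, 1
--         while q >= y:
--             x, y = y, x + y
--             c += 1
--         # descend: word(c) = word(c-2) + word(c-1); word(1) = 'a', word(2) = 'b'
--         def block(q: int, c: int) -> bool:
--             if c <= 2:
--                 return c == 1
--             if q < x_fib(c - 2):
--                 return block(q, c - 2)
--             return block(q - x_fib(c - 2), c - 1)
--         out.append(A[r] if block(q, c) else B[r])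
--     return "".join(out)
--
-- def x_fib(k: int) -> int:
--     a, b = 0, 1
--     for _ in range(k):
--         a, b = b, a + b
--     return a
-- ===== Notes on version B (the rewrite author's own statement) =====
-- stated objective: alternative
-- what changed: B replaces A's scaled-fibonacci list and iterative two-loop digit descent by a divmod block decomposition: each query index is split into (block number, offset) by divmod(index, len(A)), the block's letter is found by a recursive descent over pure Fibonacci numbers, and the index multiply-loop is replaced by the closed form (127+19*n)*7**n-1.
-- outside the precondition, e.g. on solve('abcdefghijk', 'ABCDEFGHI'): A returns 'EHFBkDIiHcIGIDekjf', B returns 'EHFBkDIiHcIGIDekjf'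
import Mathlib
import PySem

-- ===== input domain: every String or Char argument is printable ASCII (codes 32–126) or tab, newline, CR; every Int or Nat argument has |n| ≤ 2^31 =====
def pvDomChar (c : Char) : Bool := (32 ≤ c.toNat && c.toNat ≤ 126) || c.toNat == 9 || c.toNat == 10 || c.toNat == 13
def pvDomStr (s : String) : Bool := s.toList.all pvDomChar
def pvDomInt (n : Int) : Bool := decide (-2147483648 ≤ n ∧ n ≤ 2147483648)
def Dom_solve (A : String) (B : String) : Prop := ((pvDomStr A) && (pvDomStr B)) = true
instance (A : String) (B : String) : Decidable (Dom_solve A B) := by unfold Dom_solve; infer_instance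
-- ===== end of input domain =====

-- B replaces A's scaled-fibonacci list and iterative digit descent by a divmod block
-- decomposition over pure Fibonacci numbers (alternative algorithm, same cost).

-- ===== PORT A =====
-- while fibonacci[-1] < (1 << 63): fibonacci.append(fibonacci[-2] + fibonacci[-1])
-- (fuel 120 only makes the loop total; for len(A) ≥ 1 the stop condition is reached first,
--  for len(A) = 0 the Python loops forever — excluded by Pre_)
def buildFibAux : Nat → List Int → List Int
  | 0, l => l
  | f+1, l =>
    if PySem.List.pyGetD l (-1) 0 < 2^63 then
      buildFibAux f (l ++ [PySem.List.pyGetD l (-2) 0 + PySem.List.pyGetD l (-1) 0])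
    else l

def buildFib (bs : Int) : List Int := buildFibAux 120 [0, bs]

-- while index >= fibonacci[current]: current += 1   (scans fibL.drop 1 with counter; [] = IndexError)
def findCur : List Int → Int → Nat → Option Nat
  | [], _, _ => none
  | v :: rest, index, cur => if v ≤ index then findCur rest index (cur+1) else some cur

-- the 'while True' descent; current is ≥ 1 throughout in A, the 0 case is unreachable
def digitLoop (A B : String) (fibL : List Int) : Nat → Int → Option Char
  | 0, _ => none
  | 1, index => PySem.Str.pyGet? A index
  | 2, index => PySem.Str.pyGet? B index
  | (c+3), index =>
    match PySem.List.pyGet? fibL (((c+3 : Nat) : Int) - 2) with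
    | none => none
    | some mid =>
      if index < mid then digitLoop A B fibL (c+1) index
      else digitLoop A B fibL (c+2) (index - mid)

def digitAt (A B : String) (index : Int) (fibL : List Int) : Option Char :=
  match findCur (fibL.drop 1) index 1 with
  | none => none
  | some c => digitLoop A B fibL c index

-- for _ in range(1, n+1): index *= 7
def mulLoop (x n : Int) : Int := (PySem.List.pyRange 1 (n+1) 1).foldl (fun acc _ => acc * 7) x

-- "".join(output); none = an IndexError occurred (outside Pre_)
def joinChars (cs : List (Option Char)) : String :=
  match cs.mapM id with
  | some l => String.ofList l
  | none => ""

def solve (A : String) (B : String) : String :=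
  let fibL := buildFib (PySem.Str.len A)
  joinChars ((PySem.List.pyRange 17 (-1) (-1)).map (fun n =>
    digitAt A B (mulLoop (127 + 19 * n) n - 1) fibL))

-- ===== PORT B =====
def xfib (k : Nat) : Int :=
  ((List.range k).foldl (fun (p : Int × Int) _ => (p.2, p.1 + p.2)) (0, 1)).1

-- while q >= y: x, y = y, x + y; c += 1   (fuel q.toNat + 2 suffices: fib(c) ≥ c - 1)
def findB : Nat → Int → Int → Nat → Int → Nat
  | 0, _, _, c, _ => c
  | f+1, x, y, c, q => if y ≤ q then findB f y (x+y) (c+1) q else c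

-- if c <= 2: return c == 1; then descend on pure Fibonacci numbers
def blockLetter : Nat → Int → Bool
  | 0, _ => false
  | 1, _ => true
  | 2, _ => false
  | c+3, q =>
    if q < xfib (c+1) then blockLetter (c+1) q
    else blockLetter (c+2) (q - xfib (c+1))

def solve_alt (A : String) (B : String) : String :=
  let bs := PySem.Str.len A
  joinChars ((PySem.List.pyRange 17 (-1) (-1)).map (fun n =>
    let index := (127 + 19 * n) * 7 ^ n.toNat - 1
    let q := PySem.Int.floordiv index bs
    let r := PySem.Int.mod index bs
    if blockLetter (findB (q.toNat + 2) 0 1 1 q) q then PySem.Str.pyGet? A r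
    else PySem.Str.pyGet? B r))

-- ===== PRECONDITION & SPEC =====
-- Pre_ excludes empty A (build_fibonacci then loops forever) and B shorter than A (some of the
-- 18 fixed queries may then index B past its end and raise IndexError; which lengths survive
-- depends on len(A) in no closed-form way, so all such B are excluded — both programs behave
-- identically there anyway).
def Pre_solve (A : String) (B : String) : Prop :=
  1 ≤ PySem.Str.len A ∧ PySem.Str.len A ≤ PySem.Str.len B
instance (A : String) (B : String) : Decidable (Pre_solve A B) := by unfold Pre_solve; infer_instance
def pvWitness_solve : String × String := ("ab", "cd")
def Spec_solve (A : String) (B : String) (out : String) : Prop := out = solve_alt A B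
instance (A : String) (B : String) (out : String) : Decidable (Spec_solve A B out) := by unfold Spec_solve; infer_instance

-- ===== CLAIM (what is proved, stated in full; the proofs are below) =====
def Claim_equal_solve : Prop := ∀ (A : String) (B : String), Dom_solve A B → Pre_solve A B → Spec_solve A B (solve A B)

-- ===== LEMMAS AND PROOFS =====
def pvFib (k : Nat) : Int := (Nat.fib k : Int)

-- bounded search for the first c ≥ j with q < fib c (reference for both ports' scans)
def firstC (q : Int) : Nat → Nat → Option Nat
  | _, 0 => none
  | j, k+1 => if q < pvFib j then some j else firstC q (j+1) k

theorem pvFib_nonneg (k : Nat) : 0 ≤ pvFib k := Int.natCast_nonneg _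

theorem pvFib_add_two (k : Nat) : pvFib (k+2) = pvFib k + pvFib (k+1) := by
  unfold pvFib; exact_mod_cast Nat.fib_add_two

theorem pvFib_mono {k l : Nat} (h : k ≤ l) : pvFib k ≤ pvFib l := by
  unfold pvFib; exact_mod_cast Nat.fib_mono h

theorem natfib_ge (k : Nat) : k ≤ Nat.fib (k+1) := by
  induction k with
  | zero => simp
  | succ n ih =>
    rw [Nat.fib_add_two]
    rcases Nat.eq_zero_or_pos n with h | h
    · subst h; decide
    · have := Nat.fib_pos.2 h
      omega

theorem pvFib_ge (k : Nat) : (k : Int) ≤ pvFib (k+1) := by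
  unfold pvFib; exact_mod_cast natfib_ge k

theorem pvFib_93 : (2:Int)^63 ≤ pvFib 93 := by
  unfold pvFib; exact_mod_cast (by decide : (2:Nat)^63 ≤ Nat.fib 93)

theorem xfib_pair (k : Nat) :
    (List.range k).foldl (fun (p : Int × Int) _ => (p.2, p.1 + p.2)) (0, 1) =
      (pvFib k, pvFib (k+1)) := by
  induction k with
  | zero => simp [pvFib]
  | succ n ih =>
    rw [List.range_succ, List.foldl_append, ih]
    simp [pvFib_add_two]

theorem xfib_eq (k : Nat) : xfib k = pvFib k := by
  unfold xfib; rw [xfib_pair]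

theorem buildAux_spec (bs : Int) (h1 : 1 ≤ bs) :
    ∀ fuel m, 2 ≤ m → 94 ≤ m + fuel →
    ∃ m', 2 ≤ m' ∧
      buildFibAux fuel ((List.range m).map (fun k => bs * pvFib k)) =
        (List.range m').map (fun k => bs * pvFib k) ∧
      2^63 ≤ bs * pvFib (m' - 1) := by
  intro fuel
  induction fuel with
  | zero =>
    intro m hm h94
    refine ⟨m, hm, rfl, ?_⟩
    have hmono := pvFib_mono (show 93 ≤ m - 1 by omega)
    have h93 := pvFib_93
    have hnn : 0 ≤ pvFib 93 := pvFib_nonneg _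
    nlinarith
  | succ f ih =>
    intro m hm h94
    have hlen : ((List.range m).map (fun k => bs * pvFib k)).length = m := by simp
    have hg1 : PySem.List.pyGetD ((List.range m).map (fun k => bs * pvFib k)) (-1) 0 =
        bs * pvFib (m-1) := by
      rw [PySem.List.pyGetD_neg_ofNat _ 1 0 (by omega) (by omega)]
      simp
    have hg2 : PySem.List.pyGetD ((List.range m).map (fun k => bs * pvFib k)) (-2) 0 =
        bs * pvFib (m-2) := by
      rw [PySem.List.pyGetD_neg_ofNat _ 2 0 (by omega) (by omega)]
      simp
    unfold buildFibAux
    rw [hg1, hg2]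
    by_cases hlt : bs * pvFib (m-1) < 2^63
    · rw [if_pos hlt]
      have happ : (List.range m).map (fun k => bs * pvFib k) ++
          [bs * pvFib (m-2) + bs * pvFib (m-1)] =
          (List.range (m+1)).map (fun k => bs * pvFib k) := by
        rw [List.range_succ, List.map_append]
        congr 1
        have h2 : m - 2 + 2 = m := by omega
        have h3 : m - 2 + 1 = m - 1 := by omega
        have := pvFib_add_two (m-2)
        rw [h2, h3] at this
        simp [this, mul_add]
      rw [happ]
      obtain ⟨m', h2, h3, h4⟩ := ih (m+1) (by omega) (by omega)
      exact ⟨m', h2, h3, h4⟩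
    · rw [if_neg hlt]
      exact ⟨m, hm, rfl, by omega⟩

theorem buildFib_spec (bs : Int) (h1 : 1 ≤ bs) :
    ∃ m, 2 ≤ m ∧ buildFib bs = (List.range m).map (fun k => bs * pvFib k) ∧
      2^63 ≤ bs * pvFib (m - 1) := by
  have h : ([0, bs] : List Int) = (List.range 2).map (fun k => bs * pvFib k) := by
    have : List.range 2 = [0, 1] := by decide
    simp [this, pvFib]
  unfold buildFib
  rw [h]
  exact buildAux_spec bs h1 120 2 (by omega) (by omega)

theorem findCur_eq_firstC (bs : Int) (hbs : 0 < bs) (index : Int) :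
    ∀ k j, findCur ((List.range' j k).map (fun i => bs * pvFib i)) index j =
      firstC (PySem.Int.floordiv index bs) j k := by
  intro k
  induction k with
  | zero => intro j; simp [findCur, firstC]
  | succ k ih =>
    intro j
    rw [List.range'_succ, List.map_cons]
    unfold findCur firstC
    have hiff : bs * pvFib j ≤ index ↔ pvFib j ≤ PySem.Int.floordiv index bs := by
      rw [PySem.Int.le_floordiv_iff_mul_le hbs, mul_comm]
    by_cases hc : bs * pvFib j ≤ index
    · rw [if_pos hc, if_neg (not_lt.mpr (hiff.mp hc)), ih (j+1)]
    · rw [if_neg hc, if_pos (not_le.mp (fun h => hc (hiff.mpr h)))]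

theorem firstC_spec (q : Int) :
    ∀ k j c, firstC q j k = some c →
      j ≤ c ∧ c < j + k ∧ q < pvFib c ∧ (j < c → pvFib (c-1) ≤ q) := by
  intro k
  induction k with
  | zero => intro j c h; simp [firstC] at h
  | succ k ih =>
    intro j c h
    unfold firstC at h
    by_cases hq : q < pvFib j
    · rw [if_pos hq] at h
      obtain rfl : j = c := Option.some.inj h
      exact ⟨le_refl _, by omega, hq, fun h' => absurd h' (lt_irrefl _)⟩
    · rw [if_neg hq] at h
      obtain ⟨h1, h2, h3, h4⟩ := ih (j+1) c h
      refine ⟨by omega, by omega, h3, fun _ => ?_⟩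
      by_cases hjc : j + 1 < c
      · exact h4 hjc
      · have : c = j + 1 := by omega
        subst this
        simpa using not_lt.mp hq

theorem firstC_some (q : Int) :
    ∀ k j, 1 ≤ k → q < pvFib (j + k - 1) → (firstC q j k).isSome := by
  intro k
  induction k with
  | zero => intro j h; omega
  | succ k ih =>
    intro j _ hq
    unfold firstC
    by_cases h : q < pvFib j
    · rw [if_pos h]; rfl
    · rw [if_neg h]
      rcases Nat.eq_zero_or_pos k with rfl | hk
      · exact absurd (by simpa using hq) h
      · exact ih (j+1) hk (lt_of_lt_of_le hq (pvFib_mono (by omega)))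

theorem findB_eq (q : Int) :
    ∀ f k j c, 1 ≤ j → firstC q j k = some c → c ≤ j + f →
      findB f (pvFib (j-1)) (pvFib j) j q = c := by
  intro f
  induction f with
  | zero =>
    intro k j c hj h hc
    obtain ⟨h1, _, _, _⟩ := firstC_spec q k j c h
    have : c = j := by omega
    subst this
    rfl
  | succ f ih =>
    intro k j c hj h hc
    have hspec := firstC_spec q k j c h
    unfold findB
    by_cases hq : pvFib j ≤ q
    · rw [if_pos hq]
      rcases k with _ | k
      · simp [firstC] at h
      · unfold firstC at h
        rw [if_neg (not_lt.mpr hq)] at h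
        have hpair : pvFib (j-1) + pvFib j = pvFib (j+1) := by
          have h2 : j - 1 + 2 = j + 1 := by omega
          have h3 : j - 1 + 1 = j := by omega
          have := pvFib_add_two (j-1)
          rw [h2, h3] at this
          omega
        have hj' : j + 1 - 1 = j := by omega
        have := ih k (j+1) c (by omega) h (by omega)
        rw [hj'] at this
        rw [hpair]
        exact this
    · rw [if_neg hq]
      -- q < fib j: firstC must have answered j
      rcases k with _ | k
      · simp [firstC] at h
      · unfold firstC at h
        rw [if_pos (not_le.mp hq)] at h
        exact Option.some.inj h

theorem digitLoop_eq (A B : String) (bs : Int) (h1 : 1 ≤ bs) (m : Nat) :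
    ∀ c, 1 ≤ c → c < m → ∀ index, 0 ≤ index → index < bs * pvFib c →
    digitLoop A B ((List.range m).map (fun k => bs * pvFib k)) c index =
      (if blockLetter c (PySem.Int.floordiv index bs) then
        PySem.Str.pyGet? A (PySem.Int.mod index bs)
      else PySem.Str.pyGet? B (PySem.Int.mod index bs)) := by
  intro c
  induction c using Nat.strong_induction_on with
  | _ c ih =>
    match c with
    | 0 => intro h; omega
    | 1 =>
      intro _ _ index h0 hb
      have hb' : index < bs := by
        have : pvFib 1 = 1 := rfl
        rw [this, mul_one] at hb
        exact hb
      have hmod : PySem.Int.mod index bs = index := by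
        rw [PySem.Int.mod_eq_emod_of_pos (by omega)]
        exact Int.emod_eq_of_lt h0 hb'
      simp [digitLoop, blockLetter, hmod]
    | 2 =>
      intro _ _ index h0 hb
      have hb' : index < bs := by
        have : pvFib 2 = 1 := rfl
        rw [this, mul_one] at hb
        exact hb
      have hmod : PySem.Int.mod index bs = index := by
        rw [PySem.Int.mod_eq_emod_of_pos (by omega)]
        exact Int.emod_eq_of_lt h0 hb'
      simp [digitLoop, blockLetter, hmod]
    | d + 3 =>
      intro _ hm index h0 hb
      have hd1m : d + 1 < m := by omega
      have hq : PySem.Int.floordiv index bs < pvFib (d+1) ↔ index < bs * pvFib (d+1) := by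
        rw [PySem.Int.floordiv_lt_iff_lt_mul (by omega), mul_comm]
      have hget : PySem.List.pyGet? ((List.range m).map (fun k => bs * pvFib k))
          (((d+3 : Nat) : Int) - 2) = some (bs * pvFib (d+1)) := by
        have hcast : (((d+3 : Nat) : Int) - 2) = ((d+1 : Nat) : Int) := by push_cast; ring
        rw [hcast, PySem.List.pyGet?_natCast]
        simp [hd1m]
      have hred : blockLetter (d+3) (PySem.Int.floordiv index bs) =
          if PySem.Int.floordiv index bs < xfib (d+1) then
            blockLetter (d+1) (PySem.Int.floordiv index bs)
          else blockLetter (d+2) (PySem.Int.floordiv index bs - xfib (d+1)) := rfl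
      unfold digitLoop
      rw [hget]
      dsimp only
      by_cases hlt : index < bs * pvFib (d+1)
      · have hbl : blockLetter (d+3) (PySem.Int.floordiv index bs) =
            blockLetter (d+1) (PySem.Int.floordiv index bs) := by
          rw [hred, xfib_eq, if_pos (hq.mpr hlt)]
        rw [hbl, if_pos hlt]
        exact ih (d+1) (by omega) (by omega) (by omega) index h0 hlt
      · have hbl : blockLetter (d+3) (PySem.Int.floordiv index bs) =
            blockLetter (d+2) (PySem.Int.floordiv index bs - pvFib (d+1)) := by
          rw [hred, xfib_eq, if_neg (fun h => hlt (hq.mp h))]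
        have hrw : index - bs * pvFib (d+1) = index + (-(pvFib (d+1))) * bs := by ring
        have hfd : PySem.Int.floordiv (index - bs * pvFib (d+1)) bs =
            PySem.Int.floordiv index bs - pvFib (d+1) := by
          rw [PySem.Int.floordiv_eq_ediv_of_pos (by omega),
            PySem.Int.floordiv_eq_ediv_of_pos (by omega), hrw,
            Int.add_mul_ediv_right _ _ (by omega : bs ≠ 0)]
          ring
        have hmd : PySem.Int.mod (index - bs * pvFib (d+1)) bs = PySem.Int.mod index bs := by
          rw [PySem.Int.mod_eq_emod_of_pos (by omega), PySem.Int.mod_eq_emod_of_pos (by omega),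
            hrw, Int.add_mul_emod_self_right]
        have hsum : bs * pvFib (d+3) = bs * pvFib (d+1) + bs * pvFib (d+2) := by
          rw [pvFib_add_two (d+1), mul_add]
        have h0' : 0 ≤ index - bs * pvFib (d+1) := by omega
        have hb' : index - bs * pvFib (d+1) < bs * pvFib (d+2) := by omega
        rw [hbl, if_neg hlt]
        rw [ih (d+2) (by omega) (by omega) (by omega) _ h0' hb', hfd, hmd]

set_option maxRecDepth 8192 in
theorem query_eq (A B : String) (h1 : 1 ≤ PySem.Str.len A) (index : Int)
    (h0 : 0 ≤ index) (h63 : index < 2^63) :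
    digitAt A B index (buildFib (PySem.Str.len A)) =
      (if blockLetter
          (findB ((PySem.Int.floordiv index (PySem.Str.len A)).toNat + 2) 0 1 1
            (PySem.Int.floordiv index (PySem.Str.len A)))
          (PySem.Int.floordiv index (PySem.Str.len A)) then
        PySem.Str.pyGet? A (PySem.Int.mod index (PySem.Str.len A))
      else PySem.Str.pyGet? B (PySem.Int.mod index (PySem.Str.len A))) := by
  obtain ⟨m, hm2, hfib, hlast⟩ := buildFib_spec (PySem.Str.len A) h1
  set bs := PySem.Str.len A with hbsdef
  set q := PySem.Int.floordiv index bs with hq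
  have hbs0 : 0 < bs := by omega
  have hq0 : 0 ≤ q := by
    rw [hq, PySem.Int.floordiv_eq_ediv_of_pos hbs0]
    exact Int.ediv_nonneg h0 (by omega)
  have hdrop : ((List.range m).map (fun k => bs * pvFib k)).drop 1 =
      (List.range' 1 (m-1)).map (fun k => bs * pvFib k) := by
    have hm1 : m = (m-1) + 1 := by omega
    rw [List.range_eq_range', hm1, List.range'_succ]
    simp
  have hql : q < pvFib (m-1) := by
    have hx : index < bs * pvFib (m-1) := lt_of_lt_of_le h63 hlast
    rw [hq, PySem.Int.floordiv_lt_iff_lt_mul hbs0]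
    rw [mul_comm]
    exact hx
  have hsome := firstC_some q (m-1) 1 (by omega)
    (lt_of_lt_of_le hql (pvFib_mono (by omega)))
  obtain ⟨c, hc⟩ := Option.isSome_iff_exists.mp hsome
  obtain ⟨hc1, hc2, hc3, hc4⟩ := firstC_spec q (m-1) 1 c hc
  have hcle : c ≤ 1 + (q.toNat + 2) := by
    by_cases h : 1 < c
    · have hfge := hc4 h
      have hge : ((c-2 : Nat) : Int) ≤ pvFib (c-1) := by
        have hg := pvFib_ge (c-2)
        have he : c - 2 + 1 = c - 1 := by omega
        rw [he] at hg; exact hg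
      omega
    · omega
  have hfind : findB (q.toNat + 2) 0 1 1 q = c := by
    have h := findB_eq q (q.toNat + 2) (m-1) 1 c (by omega) hc (by omega)
    simpa [pvFib] using h
  have hibc : index < bs * pvFib c := by
    rw [hq, PySem.Int.floordiv_lt_iff_lt_mul hbs0] at hc3
    rw [mul_comm]
    exact hc3
  rw [hfib]
  unfold digitAt
  rw [hdrop, findCur_eq_firstC bs hbs0 index (m-1) 1, ← hq, hc]
  dsimp only
  rw [digitLoop_eq A B bs h1 m c hc1 (by omega) index h0 hibc, hfind]

theorem foldl_mul7 : ∀ (l : List Int) (x : Int), l.foldl (fun a _ => a * 7) x = x * 7 ^ l.length := by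
  intro l
  induction l with
  | nil => intro x; simp
  | cons y l ih => intro x; simp [ih, pow_succ]; ring

theorem mulLoop_eq (x n : Int) : mulLoop x n = x * 7 ^ n.toNat := by
  unfold mulLoop
  rw [foldl_mul7, PySem.List.length_pyRange_one]
  have h : n + 1 - 1 = n := by ring
  rw [h]

theorem index_bounds (n : Int) (h0 : 0 ≤ n) (h17 : n ≤ 17) :
    0 ≤ (127 + 19 * n) * 7 ^ n.toNat - 1 ∧ (127 + 19 * n) * 7 ^ n.toNat - 1 < 2^63 := by
  have hk : n.toNat ≤ 17 := by omega
  have h7a : (1:Int) ≤ 7 ^ n.toNat := one_le_pow₀ (by norm_num)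
  have h7b : (7:Int) ^ n.toNat ≤ 7 ^ 17 := pow_le_pow_right₀ (by norm_num) hk
  constructor
  · nlinarith
  · nlinarith [pow_nonneg (by norm_num : (0:Int) ≤ 7) n.toNat]

-- ===== VERDICT (by name: the statement is the Claim_ definition above) =====
theorem solve_spec : Claim_equal_solve := by
  intro A B _hD hP
  show solve A B = solve_alt A B
  unfold solve solve_alt
  refine congrArg joinChars (List.map_congr_left ?_)
  intro n hn
  rw [PySem.List.mem_pyRange_neg_one] at hn
  obtain ⟨hb, hP2⟩ := hP
  have hB := index_bounds n (by omega) (by omega)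
  rw [mulLoop_eq]
  exact query_eq A B hb _ hB.1 hB.2
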